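-- pv_equiv track=rewrite | github.com/Leiru-Cat-Developer/Python-TRAINING | TESTS/Ex4_TEST_V1.py | battleHorde
-- ===== SOURCE A (Python) =====
-- def battleHorde(zombies: str, humans: str):
--     """
--         This function simulates a battle
--             -> zombies
--             -> humans
--     """
--     if len(list(zombies)) != len(list(humans)): return "\nYou need the same length"
--     accumulated = 0
--     stringZombie = list(zombies)
--     stringHuman = list(humans)
--     zombiesValues = [int(x) for x in stringZombie]
--     humansValues = [int(x) for x in stringHuman]
--     lastPos = len(zombiesValues)
--
--     for i in range(len(zombiesValues)-1):
--         if zombiesValues[i] == humansValues[i]: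
--             continue
--         if zombiesValues[i] > humansValues[i]:
--             accumulated = zombiesValues[i] - humansValues[i]
--             zombiesValues[i+1] += accumulated
--         if zombiesValues[i] < humansValues[i]:
--             accumulated = humansValues[i] - zombiesValues[i]
--             humansValues[i+1] += accumulated
--
--     if humansValues[lastPos-1] == zombiesValues[lastPos-1]:
--         return "x" # draw
--     if humansValues[lastPos-1] > zombiesValues[lastPos-1]:
--         return f"{humansValues[lastPos-1] - zombiesValues[lastPos-1]}h" # humans
--     if humansValues[lastPos-1] < zombiesValues[lastPos-1]:
--         return f"{zombiesValues[lastPos-1] - humansValues[lastPos-1]}z" # zombies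
-- ===== SOURCE B (Python) =====
-- def battleHorde(zombies: str, humans: str):
--     if len(zombies) != len(humans):
--         return "\nYou need the same length"
--     zvals = [int(c) for c in zombies]
--     hvals = [int(c) for c in humans]
--     s = sum(zvals) - sum(hvals)
--     if s == 0:
--         return "x"
--     return f"{s}z" if s > 0 else f"{-s}h"
-- ===== Notes on version B (the rewrite author's own statement) =====
-- stated objective: simpler
-- what changed: A's forward-carry loop (propagating each digit difference into the next position of the winning side's array) is replaced by the closed form: the final compared difference equals sum of zombie digits minus sum of human digits, so B just sums both digit lists once and formats the sign.
import Mathlib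
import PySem

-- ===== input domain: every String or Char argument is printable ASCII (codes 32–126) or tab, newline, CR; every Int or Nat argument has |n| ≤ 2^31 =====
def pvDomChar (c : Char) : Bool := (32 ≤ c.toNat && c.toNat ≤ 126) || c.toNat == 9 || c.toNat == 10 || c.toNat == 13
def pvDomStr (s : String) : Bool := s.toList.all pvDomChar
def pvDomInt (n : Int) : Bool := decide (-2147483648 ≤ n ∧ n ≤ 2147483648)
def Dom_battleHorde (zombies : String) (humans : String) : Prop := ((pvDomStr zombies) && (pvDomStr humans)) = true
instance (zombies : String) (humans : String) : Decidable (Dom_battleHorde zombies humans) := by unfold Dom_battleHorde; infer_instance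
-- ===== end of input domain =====

-- B replaces A's forward-carry digit loop by the closed form sum(digits of zombies) - sum(digits of humans); objective: simpler.

-- ===== PORT A =====
-- [int(x) for x in list(s)] — per-character int(); none = ValueError (excluded by Pre_)
def pvParseA (cs : List Char) : Option (List Int) :=
  cs.mapM (fun c => PySem.Int.ofStr? (String.ofList [c]))

def pvStepA (st : List Int × List Int) (i : Int) : List Int × List Int :=
  let zi := PySem.List.pyGetD st.1 i 0
  let hi := PySem.List.pyGetD st.2 i 0
  if zi = hi then st
  else if zi > hi then
    (PySem.List.pySetD st.1 (i + 1) (PySem.List.pyGetD st.1 (i + 1) 0 + (zi - hi)), st.2)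
  else
    (st.1, PySem.List.pySetD st.2 (i + 1) (PySem.List.pyGetD st.2 (i + 1) 0 + (hi - zi)))

def battleHorde (zombies : String) (humans : String) : String :=
  if zombies.toList.length ≠ humans.toList.length then "\nYou need the same length"
  else
    match pvParseA zombies.toList, pvParseA humans.toList with
    | some zv0, some hv0 =>
      let n : Int := zv0.length
      let st := (PySem.List.pyRange 0 (n - 1) 1).foldl pvStepA (zv0, hv0)
      match PySem.List.pyGet? st.2 (n - 1), PySem.List.pyGet? st.1 (n - 1) with
      | some hl, some zl =>
        if hl = zl then "x"
        else if hl > zl then String.ofList (PySem.Int.toChars (hl - zl) ++ ['h'])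
        else String.ofList (PySem.Int.toChars (zl - hl) ++ ['z'])
      | _, _ => ""
    | _, _ => ""

-- ===== PORT B =====
-- [int(c) for c in s] — per-character int(); none = ValueError (excluded by Pre_)
def pvParseB (cs : List Char) : Option (List Int) :=
  cs.mapM (fun c => PySem.Int.ofStr? (String.ofList [c]))

def battleHorde_alt (zombies : String) (humans : String) : String :=
  if zombies.toList.length ≠ humans.toList.length then "\nYou need the same length"
  else
    -- a failed int() is a ValueError (excluded by Pre_): both parses must succeed
    (pvParseB zombies.toList).elim "" (fun zv =>
      (pvParseB humans.toList).elim "" (fun hv =>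
        let s := zv.sum - hv.sum
        if s = 0 then "x"
        else if s > 0 then String.ofList (PySem.Int.toChars s ++ ['z'])
        else String.ofList (PySem.Int.toChars (-s) ++ ['h'])))


-- ===== PRECONDITION & SPEC =====
-- Pre_ excludes exactly the inputs where Python A raises: equal-length inputs containing a
-- non-digit character (ValueError, B raises too) and the empty equal-length input (IndexError).
def Pre_battleHorde (zombies : String) (humans : String) : Prop :=
  zombies.toList.length ≠ humans.toList.length ∨
  (zombies.toList ≠ [] ∧ zombies.toList.all Char.isDigit = true ∧ humans.toList.all Char.isDigit = true)
instance (zombies : String) (humans : String) : Decidable (Pre_battleHorde zombies humans) := by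
  unfold Pre_battleHorde; infer_instance

def pvWitness_battleHorde : String × String := ("83", "19")

def Spec_battleHorde (zombies : String) (humans : String) (out : String) : Prop := out = battleHorde_alt zombies humans
instance (zombies : String) (humans : String) (out : String) : Decidable (Spec_battleHorde zombies humans out) := by unfold Spec_battleHorde; infer_instance

-- ===== CLAIM (what is proved, stated in full; the proofs are below) =====
def Claim_equal_battleHorde : Prop := ∀ (zombies : String) (humans : String), Dom_battleHorde zombies humans → Pre_battleHorde zombies humans → Spec_battleHorde zombies humans (battleHorde zombies humans)

-- ===== LEMMAS AND PROOFS =====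
theorem pvMapM_length (f : Char → Option Int) (cs : List Char) (v : List Int)
    (h : cs.mapM f = some v) : v.length = cs.length := by
  induction cs generalizing v with
  | nil => simp at h; simp [← h]
  | cons c cs ih =>
    simp only [List.mapM_cons, Option.bind_eq_bind, Option.bind_eq_some_iff] at h
    obtain ⟨x, hx, w, hw, hv⟩ := h
    simp only [Option.pure_def, Option.some.injEq] at hv
    subst hv
    simp [ih w hw]

theorem getD_set_eq (xs : List Int) (i j : ℕ) (v : Int) (h : i < xs.length) :
    (xs.set i v).getD j 0 = if j = i then v else xs.getD j 0 := by
  by_cases hj : j = i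
  · subst hj; simp [List.getD, h]
  · simp [List.getD, List.getElem?_set_ne (fun hh => hj hh.symm), hj]

theorem sum_take_succ_getD (xs : List Int) (m : ℕ) (h : m < xs.length) :
    (xs.take (m+1)).sum = (xs.take m).sum + xs.getD m 0 := by
  rw [List.sum_take_succ xs m h, List.getD, List.getElem?_eq_getElem h]
  rfl

theorem pvLoopInv (zv hv : List Int) (n : ℕ) (hz : zv.length = n) (hh : hv.length = n)
    (hn : 1 ≤ n) (m : ℕ) (hm : m ≤ n - 1) :
    ((List.range m).foldl (fun s (k : ℕ) => pvStepA s (k : Int)) (zv, hv)).1.length = n ∧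
    ((List.range m).foldl (fun s (k : ℕ) => pvStepA s (k : Int)) (zv, hv)).2.length = n ∧
    (∀ j, m < j →
      ((List.range m).foldl (fun s (k : ℕ) => pvStepA s (k : Int)) (zv, hv)).1.getD j 0 = zv.getD j 0 ∧
      ((List.range m).foldl (fun s (k : ℕ) => pvStepA s (k : Int)) (zv, hv)).2.getD j 0 = hv.getD j 0) ∧
    ((List.range m).foldl (fun s (k : ℕ) => pvStepA s (k : Int)) (zv, hv)).1.getD m 0 -
      ((List.range m).foldl (fun s (k : ℕ) => pvStepA s (k : Int)) (zv, hv)).2.getD m 0 =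
      (zv.take (m+1)).sum - (hv.take (m+1)).sum := by
  induction m with
  | zero =>
    refine ⟨hz, hh, fun j hj => ⟨rfl, rfl⟩, ?_⟩
    rw [sum_take_succ_getD zv 0 (by omega), sum_take_succ_getD hv 0 (by omega)]
    simp
  | succ m ih =>
    obtain ⟨h1, h2, h3, h4⟩ := ih (by omega)
    set st := (List.range m).foldl (fun s (k : ℕ) => pvStepA s (k : Int)) (zv, hv) with hst
    have hrange : (List.range (m+1)).foldl (fun s (k : ℕ) => pvStepA s (k : Int)) (zv, hv)
        = pvStepA st (m : Int) := by
      rw [List.range_succ, List.foldl_append]; rfl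
    have hmn : m + 1 < n := by omega
    have hgz : PySem.List.pyGetD st.1 (m : Int) 0 = st.1.getD m 0 := by
      simp [PySem.List.pyGetD_natCast]
    have hgh : PySem.List.pyGetD st.2 (m : Int) 0 = st.2.getD m 0 := by
      simp [PySem.List.pyGetD_natCast]
    have hcast : ((m : Int) + 1).toNat = m + 1 := by omega
    have hsetz : ∀ v, PySem.List.pySetD st.1 ((m : Int) + 1) v = st.1.set (m+1) v := by
      intro v; rw [PySem.List.pySetD_of_nonneg _ v (by omega), hcast]
    have hseth : ∀ v, PySem.List.pySetD st.2 ((m : Int) + 1) v = st.2.set (m+1) v := by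
      intro v; rw [PySem.List.pySetD_of_nonneg _ v (by omega), hcast]
    have hgz1 : PySem.List.pyGetD st.1 ((m : Int) + 1) 0 = st.1.getD (m+1) 0 := by
      rw [PySem.List.pyGetD_of_nonneg _ _ (by omega), hcast]
    have hgh1 : PySem.List.pyGetD st.2 ((m : Int) + 1) 0 = st.2.getD (m+1) 0 := by
      rw [PySem.List.pyGetD_of_nonneg _ _ (by omega), hcast]
    have hj1 := h3 (m+1) (by omega)
    have hsz : (zv.take (m+1+1)).sum = (zv.take (m+1)).sum + zv.getD (m+1) 0 :=
      sum_take_succ_getD zv (m+1) (by omega)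
    have hsh : (hv.take (m+1+1)).sum = (hv.take (m+1)).sum + hv.getD (m+1) 0 :=
      sum_take_succ_getD hv (m+1) (by omega)
    rw [hrange]
    unfold pvStepA
    rw [hgz, hgh]
    by_cases heq : st.1.getD m 0 = st.2.getD m 0
    · rw [if_pos heq]
      refine ⟨h1, h2, fun j hj => h3 j (by omega), ?_⟩
      rw [hj1.1, hj1.2, hsz, hsh]
      have : (zv.take (m+1)).sum - (hv.take (m+1)).sum = 0 := by rw [← h4, heq]; ring
      omega
    · by_cases hgt : st.1.getD m 0 > st.2.getD m 0
      · simp only [if_neg heq, if_pos hgt, hsetz, hgz1]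
        refine ⟨by simp [h1], h2, fun j hj => ?_, ?_⟩
        · constructor
          · rw [getD_set_eq _ _ _ _ (by omega), if_neg (by omega)]
            exact (h3 j (by omega)).1
          · exact (h3 j (by omega)).2
        · rw [getD_set_eq _ _ _ _ (by omega), if_pos rfl, hj1.1, hj1.2, hsz, hsh]
          omega
      · simp only [if_neg heq, if_neg hgt, hseth, hgh1]
        refine ⟨h1, by simp [h2], fun j hj => ?_, ?_⟩
        · constructor
          · exact (h3 j (by omega)).1
          · rw [getD_set_eq _ _ _ _ (by omega), if_neg (by omega)]
            exact (h3 j (by omega)).2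
        · rw [getD_set_eq _ _ _ _ (by omega), if_pos rfl, hj1.1, hj1.2, hsz, hsh]
          omega

theorem pvMain (zombies humans : String)
    (hne : zombies.toList ≠ []) (hlen : zombies.toList.length = humans.toList.length) :
    battleHorde zombies humans = battleHorde_alt zombies humans := by
  have hAB : ∀ cs, pvParseB cs = pvParseA cs := fun _ => rfl
  rw [battleHorde, battleHorde_alt, if_neg (by omega), if_neg (by omega)]
  simp only [hAB]
  cases hpz : pvParseA zombies.toList with
  | none =>
    cases hph : pvParseA humans.toList <;> rfl
  | some zv0 =>
    cases hph : pvParseA humans.toList with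
    | none => rfl
    | some hv0 =>
      simp only [Option.elim]
      set n : ℕ := zombies.toList.length with hn
      have hn1 : 1 ≤ n := by
        cases hz : zombies.toList with
        | nil => exact absurd hz hne
        | cons a l => rw [hn, hz]; simp
      have hzl : zv0.length = n := pvMapM_length _ _ _ hpz
      have hhl : hv0.length = n := by rw [pvMapM_length _ _ _ hph, ← hlen]
      -- turn the pyRange fold into a List.range fold
      have hfold : (PySem.List.pyRange 0 ((zv0.length : Int) - 1) 1).foldl pvStepA (zv0, hv0)
          = (List.range (n - 1)).foldl (fun s (k : ℕ) => pvStepA s (k : Int)) (zv0, hv0) := by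
        rw [PySem.List.pyRange_one]
        have : (((zv0.length : Int) - 1) - 0).toNat = n - 1 := by omega
        rw [this, List.foldl_map]
        simp
      obtain ⟨h1, h2, _, h4⟩ := pvLoopInv zv0 hv0 n hzl hhl hn1 (n - 1) le_rfl
      set st := (List.range (n - 1)).foldl (fun s (k : ℕ) => pvStepA s (k : Int)) (zv0, hv0) with hstdef
      have htake : n - 1 + 1 = n := by omega
      rw [htake, List.take_of_length_le (le_of_eq hzl), List.take_of_length_le (le_of_eq hhl)] at h4
      -- the final indexing
      have hcast : ((zv0.length : Int) - 1).toNat = n - 1 := by omega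
      have hget2 : PySem.List.pyGet? st.2 ((zv0.length : Int) - 1) = some (st.2.getD (n-1) 0) := by
        rw [PySem.List.pyGet?_of_nonneg _ (by omega), hcast,
          List.getElem?_eq_getElem (by omega), List.getD, List.getElem?_eq_getElem (by omega)]
        rfl
      have hget1 : PySem.List.pyGet? st.1 ((zv0.length : Int) - 1) = some (st.1.getD (n-1) 0) := by
        rw [PySem.List.pyGet?_of_nonneg _ (by omega), hcast,
          List.getElem?_eq_getElem (by omega), List.getD, List.getElem?_eq_getElem (by omega)]
        rfl
      rw [hfold, hget1, hget2]
      show (if st.2.getD (n-1) 0 = st.1.getD (n-1) 0 then "x"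
        else if st.2.getD (n-1) 0 > st.1.getD (n-1) 0 then
          String.ofList (PySem.Int.toChars (st.2.getD (n-1) 0 - st.1.getD (n-1) 0) ++ ['h'])
        else String.ofList (PySem.Int.toChars (st.1.getD (n-1) 0 - st.2.getD (n-1) 0) ++ ['z'])) = _
      by_cases hba : st.2.getD (n-1) 0 = st.1.getD (n-1) 0
      · have hS0 : zv0.sum - hv0.sum = 0 := by omega
        rw [if_pos hba, if_pos hS0]
      · have hS0 : ¬ (zv0.sum - hv0.sum = 0) := by omega
        rw [if_neg hba, if_neg hS0]
        by_cases hgt : st.2.getD (n-1) 0 > st.1.getD (n-1) 0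
        · have hSpos : ¬ (zv0.sum - hv0.sum > 0) := by omega
          have he : st.2.getD (n-1) 0 - st.1.getD (n-1) 0 = -(zv0.sum - hv0.sum) := by omega
          rw [if_pos hgt, if_neg hSpos, he]
        · have hSpos : zv0.sum - hv0.sum > 0 := by omega
          have he : st.1.getD (n-1) 0 - st.2.getD (n-1) 0 = zv0.sum - hv0.sum := by omega
          rw [if_neg hgt, if_pos hSpos, he]

-- ===== VERDICT (by name: the statement is the Claim_ definition above) =====
theorem battleHorde_spec : Claim_equal_battleHorde := by
  intro zombies humans _ hpre
  unfold Spec_battleHorde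
  by_cases hlen : zombies.toList.length = humans.toList.length
  · have hne : zombies.toList ≠ [] := by
      cases hpre with
      | inl hl => exact absurd hlen hl
      | inr hr => exact hr.1
    exact pvMain zombies humans hne hlen
  · rw [battleHorde, battleHorde_alt, if_pos hlen, if_pos hlen]
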